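-- pv_equiv track=rewrite | github.com/thiviyanT/IntelliGraphs | intelligraphs/data_loaders/utils.py | compute_min_max_edges
-- ===== SOURCE A (Python) =====
-- from typing import List, Dict, Tuple, Union
--
-- def compute_min_max_edges(
--         subgraphs: List[List[List[Union[str, int]]]]
--     ) -> Tuple[int, int]:
--     """
--     Compute the minimum and maximum number of edges in subgraphs.
--
--     Args:
--         subgraphs (List[List[List[Union[str, int]]]]): List of subgraphs, where each
--             subgraph is a list of triples. Each triple contains subject, predicate,
--             and object elements.
--
--     Returns:
--         Tuple[int, int]: A tuple containing (min_edges, max_edges), where: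
--             - min_edges: Minimum number of edges in any subgraph
--             - max_edges: Maximum number of edges in any subgraph
--     """
--     min_edges, max_edges = float('inf'), 0
--
--     for subgraph in subgraphs:
--         num_edges = len(subgraph)
--         min_edges = min(min_edges, num_edges)
--         max_edges = max(max_edges, num_edges)
--
--     return min_edges, max_edges
-- ===== SOURCE B (Python) =====
-- def compute_min_max_edges(subgraphs):
--     n = len(subgraphs)
--     if n == 0:
--         return float('inf'), 0
--     if n == 1:
--         k = len(subgraphs[0])
--         return k, k
--     min_l, max_l = compute_min_max_edges(subgraphs[:n // 2])
--     min_r, max_r = compute_min_max_edges(subgraphs[n // 2:])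
--     return min(min_l, min_r), max(max_l, max_r)
-- ===== Notes on version B (the rewrite author's own statement) =====
-- stated objective: alternative
-- what changed: Replaces A's single linear fold over a running (min,max) accumulator with a divide-and-conquer recursion that splits the list in half and merges the two halves' (min,max) pairs.
-- outside the precondition, e.g. on compute_min_max_edges([]): A returns (inf, 0), B returns (inf, 0)
import Mathlib
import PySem

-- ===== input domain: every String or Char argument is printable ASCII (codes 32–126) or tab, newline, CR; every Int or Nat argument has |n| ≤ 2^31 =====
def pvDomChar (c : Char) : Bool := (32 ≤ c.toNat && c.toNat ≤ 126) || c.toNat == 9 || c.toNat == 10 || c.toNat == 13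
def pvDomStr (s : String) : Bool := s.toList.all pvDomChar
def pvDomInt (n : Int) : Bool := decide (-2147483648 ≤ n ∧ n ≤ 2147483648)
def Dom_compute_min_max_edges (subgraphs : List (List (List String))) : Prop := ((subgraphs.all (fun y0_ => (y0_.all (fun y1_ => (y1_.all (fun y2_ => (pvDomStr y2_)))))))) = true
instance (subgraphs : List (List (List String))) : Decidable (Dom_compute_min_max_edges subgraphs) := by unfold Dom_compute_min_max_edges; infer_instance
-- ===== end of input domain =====

-- B computes the (min,max) edge counts by divide-and-conquer on halves of the list and
-- merges the two pairs, instead of A's single linear fold over a running accumulator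
-- (objective: alternative).

-- ===== PORT A =====
-- A's min_edges starts at float('inf'); ported exactly as `none` (min(inf, n) = n; min(m, n) = min m n).
-- On the empty input A returns the float inf itself, which is outside Pre_; the `.getD 0` there is never claimed about.
def compute_min_max_edges (subgraphs : List (List (List String))) : Int × Int :=
  let r := subgraphs.foldl
    (fun (st : Option Int × Int) subgraph =>
      let num_edges : Int := subgraph.length
      ((match st.1 with
        | none => some num_edges
        | some m => some (min m num_edges)), max st.2 num_edges))
    (none, 0)
  (r.1.getD 0, r.2)

-- ===== PORT B =====
-- Python's slices subgraphs[:n//2] / subgraphs[n//2:] with 0 ≤ n//2 ≤ n are exactly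
-- take/drop (PySem.List.slice_to_natCast / slice_from_natCast).
-- On the empty input Python B returns (float('inf'), 0), which is outside Pre_;
-- the (0, 0) there is never claimed about.
def compute_min_max_edges_alt (subgraphs : List (List (List String))) : Int × Int :=
  let n := subgraphs.length
  if n = 0 then (0, 0)
  else if n = 1 then
    let k : Int := ((subgraphs[0]?).getD []).length
    (k, k)
  else
    let l := compute_min_max_edges_alt (subgraphs.take (n / 2))
    let r := compute_min_max_edges_alt (subgraphs.drop (n / 2))
    (min l.1 r.1, max l.2 r.2)
termination_by subgraphs.length
decreasing_by
  · simp [List.length_take]; omega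
  · simp [List.length_drop]; omega

-- ===== PRECONDITION & SPEC =====
-- Pre_ excludes the empty list, on which both Pythons return (float('inf'), 0) — not a value of the declared int type.
def Pre_compute_min_max_edges (subgraphs : List (List (List String))) : Prop := subgraphs ≠ []
instance (subgraphs : List (List (List String))) : Decidable (Pre_compute_min_max_edges subgraphs) := by unfold Pre_compute_min_max_edges; infer_instance
def pvWitness_compute_min_max_edges : List (List (List String)) := [[["a", "b", "c"]]]
def Spec_compute_min_max_edges (subgraphs : List (List (List String))) (out : Int × Int) : Prop := out = compute_min_max_edges_alt subgraphs
instance (subgraphs : List (List (List String))) (out : Int × Int) : Decidable (Spec_compute_min_max_edges subgraphs out) := by unfold Spec_compute_min_max_edges; infer_instance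

-- ===== CLAIM (what is proved, stated in full; the proofs are below) =====
def Claim_equal_compute_min_max_edges : Prop := ∀ (subgraphs : List (List (List String))), Dom_compute_min_max_edges subgraphs → Pre_compute_min_max_edges subgraphs → Spec_compute_min_max_edges subgraphs (compute_min_max_edges subgraphs)

-- ===== LEMMAS AND PROOFS =====

-- The common nonempty-list semantics: running min / max of the lengths seeded with the head's length.
def pvMinFold (L : List Int) : Int := match L with | [] => 0 | x :: t => t.foldl min x
def pvMaxFold (L : List Int) : Int := match L with | [] => 0 | x :: t => t.foldl max x

theorem foldl_min_seed (s : List Int) (A y : Int) :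
    s.foldl min (min A y) = min A (s.foldl min y) := by
  induction s generalizing y with
  | nil => simp
  | cons z s ih => simpa [min_assoc] using ih (min y z)

theorem foldl_max_seed (s : List Int) (A y : Int) :
    s.foldl max (max A y) = max A (s.foldl max y) := by
  induction s generalizing y with
  | nil => simp
  | cons z s ih => simpa [max_assoc] using ih (max y z)

theorem pvMinFold_append (u v : List Int) (hu : u ≠ []) (hv : v ≠ []) :
    pvMinFold (u ++ v) = min (pvMinFold u) (pvMinFold v) := by
  cases u with
  | nil => exact absurd rfl hu
  | cons x t =>
    cases v with
    | nil => exact absurd rfl hv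
    | cons y s =>
      simp [pvMinFold, List.foldl_append, List.foldl_cons, foldl_min_seed]

theorem pvMaxFold_append (u v : List Int) (hu : u ≠ []) (hv : v ≠ []) :
    pvMaxFold (u ++ v) = max (pvMaxFold u) (pvMaxFold v) := by
  cases u with
  | nil => exact absurd rfl hu
  | cons x t =>
    cases v with
    | nil => exact absurd rfl hv
    | cons y s =>
      simp [pvMaxFold, List.foldl_append, List.foldl_cons, foldl_max_seed]

-- Once min_edges is `some m`, A's fold computes the running min/max of the remaining lengths.
theorem foldA_some (l : List (List (List String))) (m M : Int) :
    l.foldl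
      (fun (st : Option Int × Int) subgraph =>
        let num_edges : Int := subgraph.length
        ((match st.1 with
          | none => some num_edges
          | some m => some (min m num_edges)), max st.2 num_edges))
      (some m, M)
    = (some ((l.map (fun s => (s.length : Int))).foldl min m),
       (l.map (fun s => (s.length : Int))).foldl max M) := by
  induction l generalizing m M with
  | nil => simp
  | cons x t ih => simp [List.foldl_cons, ih]

theorem A_char (l : List (List (List String))) (h : l ≠ []) :
    compute_min_max_edges l
      = (pvMinFold (l.map (fun s => (s.length : Int))),
         pvMaxFold (l.map (fun s => (s.length : Int)))) := by
  cases l with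
  | nil => exact absurd rfl h
  | cons x t =>
    unfold compute_min_max_edges
    simp only [List.foldl_cons, foldA_some, Option.getD_some, List.map_cons, pvMinFold, pvMaxFold]
    have hx : max (0 : Int) (x.length : Int) = (x.length : Int) :=
      max_eq_right (Int.natCast_nonneg _)
    rw [hx]

theorem B_char (l : List (List (List String))) (h : l ≠ []) :
    compute_min_max_edges_alt l
      = (pvMinFold (l.map (fun s => (s.length : Int))),
         pvMaxFold (l.map (fun s => (s.length : Int)))) := by
  induction hn : l.length using Nat.strong_induction_on generalizing l with
  | _ n ih =>
    have hlen : l.length ≠ 0 := by simpa using h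
    rw [compute_min_max_edges_alt]
    by_cases h1 : l.length = 1
    · cases l with
      | nil => exact absurd rfl h
      | cons x t =>
        have ht : t = [] := by
          simpa [List.length_eq_zero_iff] using h1
        subst ht
        simp [pvMinFold, pvMaxFold]
    · have h2 : 2 ≤ l.length := by omega
      have hm1 : 1 ≤ l.length / 2 := by omega
      have hm2 : l.length / 2 < l.length := by omega
      have htake : (l.take (l.length / 2)).length = l.length / 2 := by
        simp [List.length_take]; omega
      have hdrop : (l.drop (l.length / 2)).length = l.length - l.length / 2 := by
        simp [List.length_drop]
      have htne : l.take (l.length / 2) ≠ [] := by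
        intro he; rw [he] at htake; simp at htake; omega
      have hdne : l.drop (l.length / 2) ≠ [] := by
        intro he; rw [he] at hdrop; simp at hdrop; omega
      have iht := ih (l.length / 2) (by omega) (l.take (l.length / 2)) htne htake
      have ihd := ih (l.length - l.length / 2) (by omega) (l.drop (l.length / 2)) hdne hdrop
      simp only [hlen, h1, if_false, iht, ihd]
      have hsplit : l = l.take (l.length / 2) ++ l.drop (l.length / 2) :=
        (List.take_append_drop _ _).symm
      have humap : (l.map (fun s => (s.length : Int)))
          = (l.take (l.length / 2)).map (fun s => (s.length : Int))
            ++ (l.drop (l.length / 2)).map (fun s => (s.length : Int)) := by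
        conv_lhs => rw [hsplit]
        simp
      have huN : (l.take (l.length / 2)).map (fun s => (s.length : Int)) ≠ [] := by
        simpa using htne
      have hvN : (l.drop (l.length / 2)).map (fun s => (s.length : Int)) ≠ [] := by
        simpa using hdne
      rw [humap, pvMinFold_append _ _ huN hvN, pvMaxFold_append _ _ huN hvN]

-- ===== VERDICT (by name: the statement is the Claim_ definition above) =====
theorem compute_min_max_edges_spec : Claim_equal_compute_min_max_edges := by
  intro subgraphs _ hpre
  unfold Spec_compute_min_max_edges
  rw [A_char subgraphs hpre, B_char subgraphs hpre]
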